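-- pv_equiv track=rewrite | github.com/annatarasenok/Inv-Indx | Search.py | standart
-- ===== SOURCE A (Python) =====
-- def standart(searc):
--     lst = searc.replace('\n', '')
--     lst = list(lst)
--     marks = '''!()-[]{};?@#$%:'"\,./^&;*_'''
--
--     for i in range(len(lst)):
--         if lst[i] in marks:
--             lst[i] = " ";
--     # Удаление всех знаков препинания
--     lst = ''.join(lst).lower().split("  ")
--
--     it = 0;
--     while it != len(lst):
--         lst[it] = lst[it].split(" ")
--         it=it+1
--
--     flat_list = []
--     for sublist in lst:
--         for item in sublist:
--             flat_list.append(item)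
--
--     while True:
--         try:
--             flat_list.remove('')
--         except:
--             break
--     return(flat_list)
-- ===== SOURCE B (Python) =====
-- def standart(searc):
--     marks = set('''!()-[]{};?@#$%:'"\,./^&;*_''')
--     res = []
--     buf = []
--     for ch in searc.replace('\n', '').lower():
--         if ch == ' ' or ch in marks:
--             if buf:
--                 res.append(''.join(buf))
--                 buf = []
--         else:
--             buf.append(ch)
--     if buf:
--         res.append(''.join(buf))
--     return res
-- ===== Notes on version B (the rewrite author's own statement) =====
-- stated objective: simpler
-- what changed: A's multi-pass pipeline (replace punctuation by spaces, join, lower, split on double space, split each piece on single space, flatten, repeatedly remove '') is replaced by a single left-to-right scan that keeps a current-word buffer and flushes it at each space/punctuation delimiter.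
import Mathlib
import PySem

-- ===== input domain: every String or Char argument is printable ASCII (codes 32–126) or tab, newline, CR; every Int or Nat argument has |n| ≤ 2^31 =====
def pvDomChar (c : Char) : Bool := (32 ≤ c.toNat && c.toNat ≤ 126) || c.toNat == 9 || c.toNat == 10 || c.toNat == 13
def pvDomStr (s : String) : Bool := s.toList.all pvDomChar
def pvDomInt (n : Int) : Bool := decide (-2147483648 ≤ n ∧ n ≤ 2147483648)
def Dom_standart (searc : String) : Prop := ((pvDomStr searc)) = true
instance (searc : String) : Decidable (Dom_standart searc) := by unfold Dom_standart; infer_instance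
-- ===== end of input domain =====

-- B replaces A's multi-pass replace / split-on-"  " / split-on-" " / flatten / remove-'' pipeline
-- with a single left-to-right scan keeping a current-word buffer (objective: simpler, one pass).

-- ===== PORT A =====

-- the punctuation characters of A's marks string ('\,' in Python is backslash, comma; ';' occurs twice)
def pvMarks : List Char :=
  ['!', '(', ')', '-', '[', ']', '{', '}', ';', '?', '@', '#', '$', '%', ':', '\'', '"', '\\',
   ',', '.', '/', '^', '&', ';', '*', '_']

-- remove? shortens the list (termination of pvRemoveAll's while-loop)
theorem pvRemove_some_len {α : Type} [BEq α] [LawfulBEq α] {l l' : List α} {v : α}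
    (h : PySem.List.remove? l v = some l') : l'.length < l.length := by
  have hv : v ∈ l := by
    by_contra hv
    rw [(PySem.List.remove?_eq_none_iff l v).2 hv] at h
    simp at h
  rw [PySem.List.remove?_eq_some_erase l v hv] at h
  have hl : l' = l.erase v := (Option.some.injEq _ _).mp h.symm
  subst hl
  have h2 := List.length_erase_of_mem hv
  have h3 : 0 < l.length := List.length_pos_of_mem hv
  omega

-- A's "while True: try: flat_list.remove('') except: break"
def pvRemoveAll (l : List (List Char)) : List (List Char) :=
  match h : PySem.List.remove? l ([] : List Char) with
  | some l' => pvRemoveAll l'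
  | none => l
  termination_by l.length
  decreasing_by exact pvRemove_some_len h

def standart (searc : String) : List String :=
  -- lst = searc.replace('\n', ''); lst = list(lst)
  let lst0 := PySem.Chars.replace searc.toList ['\n'] []
  -- for i in range(len(lst)): if lst[i] in marks: lst[i] = " "
  let lst1 := lst0.map (fun c => if c ∈ pvMarks then ' ' else c)
  -- lst = ''.join(lst).lower().split("  ")   (''.join of the char list is the char list itself)
  let lst2 := PySem.Chars.splitOn (PySem.Chars.lower lst1) [' ', ' ']
  -- while it != len(lst): lst[it] = lst[it].split(" ")
  let lst3 := lst2.map (fun p => PySem.Chars.splitOn p [' '])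
  -- for sublist in lst: for item in sublist: flat_list.append(item)
  let flat := lst3.foldl (fun acc sub => sub.foldl (fun a it => a ++ [it]) acc) []
  -- remove all '' ; the pieces are returned as Strings
  (pvRemoveAll flat).map String.ofList

-- ===== PORT B =====

def standart_alt (searc : String) : List String :=
  -- marks = set('''!()-[]{};?@#$%:'"\,./^&;*_''')
  let marks := PySem.Set.ofList pvMarks
  -- for ch in searc.replace('\n', '').lower(): …
  let s := PySem.Chars.lower (PySem.Chars.replace searc.toList ['\n'] [])
  let st := s.foldl (fun (st : List String × List Char) ch =>
      if ch = ' ' ∨ ch ∈ marks then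
        (if st.2.isEmpty then st else (st.1 ++ [String.ofList st.2], []))
      else (st.1, st.2 ++ [ch])) ([], [])
  if st.2.isEmpty then st.1 else st.1 ++ [String.ofList st.2]

-- ===== PRECONDITION & SPEC =====
def Spec_standart (searc : String) (out : List String) : Prop := out = standart_alt searc
instance (searc : String) (out : List String) : Decidable (Spec_standart searc out) := by unfold Spec_standart; infer_instance

-- ===== CLAIM (what is proved, stated in full; the proofs are below) =====
def Claim_equal_standart : Prop := ∀ (searc : String), Dom_standart searc → Spec_standart searc (standart searc)

-- ===== LEMMAS AND PROOFS =====

-- accumulator forms of split(" ") and split("  ")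
def pvS1 : List Char → List Char → List (List Char)
  | [], cur => [cur.reverse]
  | c :: rest, cur => if c = ' ' then cur.reverse :: pvS1 rest [] else pvS1 rest (c :: cur)

def pvS2 : List Char → List Char → List (List Char)
  | [], cur => [cur.reverse]
  | c :: rest, cur =>
      if [' ', ' '].isPrefixOf (c :: rest) then cur.reverse :: pvS2 (rest.drop 1) []
      else pvS2 rest (c :: cur)
  termination_by l _ => l.length
  decreasing_by
    all_goals simp

-- single-pass tokenizer (specification form of B's fold); pred d picks the delimiters
def pvToks (d : Char → Bool) : List Char → List Char → List (List Char)
  | [], buf => if buf.isEmpty then [] else [buf]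
  | c :: cs, buf =>
      if d c then (if buf.isEmpty then pvToks d cs [] else buf :: pvToks d cs [])
      else pvToks d cs (buf ++ [c])

def pvG (c : Char) : Char := if c ∈ pvMarks then ' ' else c
def pvD (c : Char) : Bool := decide (c = ' ' ∨ c ∈ pvMarks)

theorem go_sp1 : ∀ (fuel : Nat) (l cur : List Char) (acc : List (List Char)),
    l.length < fuel →
    PySem.Chars.splitOn.go [' '] fuel l cur acc = acc.reverse ++ pvS1 l cur := by
  intro fuel
  induction fuel with
  | zero => intro l cur acc h; omega
  | succ f ih =>
    intro l cur acc h
    cases l with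
    | nil => simp [PySem.Chars.splitOn.go, pvS1]
    | cons c rest =>
      by_cases hc : c = ' '
      · subst hc
        simp only [PySem.Chars.splitOn.go, pvS1]
        rw [ih]
        · simp
        · simp at h ⊢; omega
      · simp only [PySem.Chars.splitOn.go, pvS1]
        have hp : ([' '].isPrefixOf (c :: rest)) = false := by
          simp [List.isPrefixOf]; exact fun h' => hc h'.symm
        rw [hp]
        simp only [if_neg hc, Bool.false_eq_true, if_false]
        exact ih rest (c :: cur) acc (by simp at h ⊢; omega)

theorem go_sp2 : ∀ (fuel : Nat) (l cur : List Char) (acc : List (List Char)),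
    l.length < fuel →
    PySem.Chars.splitOn.go [' ', ' '] fuel l cur acc = acc.reverse ++ pvS2 l cur := by
  intro fuel
  induction fuel with
  | zero => intro l cur acc h; omega
  | succ f ih =>
    intro l cur acc h
    cases l with
    | nil => simp [PySem.Chars.splitOn.go, pvS2]
    | cons c rest =>
      by_cases hp : ([' ', ' '].isPrefixOf (c :: rest)) = true
      · simp only [PySem.Chars.splitOn.go, pvS2, hp, if_true]
        rw [ih]
        · simp
        · simp at h ⊢; omega
      · simp only [PySem.Chars.splitOn.go, pvS2, hp, Bool.false_eq_true, if_false]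
        exact ih rest (c :: cur) acc (by simp at h ⊢; omega)

theorem splitOn_sp1 (l : List Char) : PySem.Chars.splitOn l [' '] = pvS1 l [] := by
  have := go_sp1 (l.length + 1) l [] [] (by omega)
  simpa [PySem.Chars.splitOn] using this

theorem splitOn_sp2 (l : List Char) : PySem.Chars.splitOn l [' ', ' '] = pvS2 l [] := by
  have := go_sp2 (l.length + 1) l [] [] (by omega)
  simpa [PySem.Chars.splitOn] using this

-- the accumulator only extends the first returned piece
theorem pvS1_cur (l cur : List Char) :
    pvS1 l cur = (pvS1 l []).modifyHead (cur.reverse ++ ·) := by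
  induction l generalizing cur with
  | nil => simp [pvS1]
  | cons c rest ih =>
    by_cases hc : c = ' '
    · subst hc; simp [pvS1]
    · simp only [pvS1, if_neg hc]
      rw [ih (c :: cur), ih [c]]
      cases h : pvS1 rest [] with
      | nil => simp
      | cons a as => simp

theorem pvS2_cur (l cur : List Char) :
    pvS2 l cur = (pvS2 l []).modifyHead (cur.reverse ++ ·) := by
  induction hn : l.length using Nat.strong_induction_on generalizing l cur with
  | _ n ih =>
    cases l with
    | nil => simp [pvS2]
    | cons c rest =>
      by_cases hp : ([' ', ' '].isPrefixOf (c :: rest)) = true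
      · simp only [pvS2, hp, if_true]; simp
      · simp only [pvS2, hp, Bool.false_eq_true, if_false]
        subst hn
        rw [ih rest.length (by simp) rest (c :: cur) rfl, ih rest.length (by simp) rest [c] rfl]
        cases h : pvS2 rest [] with
        | nil => simp
        | cons a as => simp

theorem pvS1_ne_nil (l cur : List Char) : pvS1 l cur ≠ [] := by
  induction l generalizing cur with
  | nil => simp [pvS1]
  | cons c rest ih =>
    by_cases hc : c = ' '
    · subst hc; simp [pvS1]
    · simp only [pvS1, if_neg hc]; exact ih _

theorem pvS2_ne_nil (l cur : List Char) : pvS2 l cur ≠ [] := by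
  induction hn : l.length using Nat.strong_induction_on generalizing l cur with
  | _ n ih =>
    cases l with
    | nil => simp [pvS2]
    | cons c rest =>
      by_cases hp : ([' ', ' '].isPrefixOf (c :: rest)) = true
      · simp [pvS2, hp]
      · simp only [pvS2, hp, Bool.false_eq_true, if_false]
        subst hn
        exact ih rest.length (by simp) rest (c :: cur) rfl

-- accumulator-free step equations
theorem pvS1_space (r : List Char) : pvS1 (' ' :: r) [] = [] :: pvS1 r [] := by
  simp [pvS1]

theorem pvS1_char {c : Char} (hc : c ≠ ' ') (r : List Char) :
    pvS1 (c :: r) [] = (pvS1 r []).modifyHead (c :: ·) := by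
  simp only [pvS1, if_neg hc]
  rw [pvS1_cur]
  rfl

theorem pvS2_dd (r : List Char) : pvS2 (' ' :: ' ' :: r) [] = [] :: pvS2 r [] := by
  rw [pvS2]
  simp [List.isPrefixOf]

theorem pvS2_other {c : Char} {r : List Char}
    (hp : ([' ', ' '].isPrefixOf (c :: r)) ≠ true) :
    pvS2 (c :: r) [] = (pvS2 r []).modifyHead (c :: ·) := by
  rw [pvS2, if_neg hp, pvS2_cur]
  rfl

-- core composition: split on "  ", split the pieces on " ", flatten — after dropping
-- empty pieces this is split on " "; and the heads of the two lists agree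
theorem pvComp (t : List Char) :
    ((pvS2 t []).flatMap (fun p => pvS1 p [])).filter (fun p => !p.isEmpty)
      = (pvS1 t []).filter (fun p => !p.isEmpty) ∧
    ((pvS2 t []).flatMap (fun p => pvS1 p [])).head? = (pvS1 t []).head? := by
  induction hn : t.length using Nat.strong_induction_on generalizing t with
  | _ n ih =>
    subst hn
    cases t with
    | nil => exact ⟨by simp [pvS2, pvS1], by simp [pvS2, pvS1]⟩
    | cons c r =>
      by_cases hp : ([' ', ' '].isPrefixOf (c :: r)) = true
      · -- double-space case: c = ' ' and r starts with ' '
        obtain ⟨hc, c2, r2, rfl, hc2⟩ : c = ' ' ∧ ∃ c2 r2, r = c2 :: r2 ∧ c2 = ' ' := by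
          cases r with
          | nil => simp [List.isPrefixOf] at hp
          | cons c2 r2 =>
            simp [List.isPrefixOf] at hp
            exact ⟨hp.1.symm, c2, r2, rfl, hp.2.symm⟩
        subst hc; subst hc2
        have IH := ih r2.length (by simp) r2 rfl
        have e0 : pvS1 ([] : List Char) [] = [[]] := by simp [pvS1]
        rw [pvS2_dd, pvS1_space, pvS1_space]
        simp only [List.flatMap_cons, e0]
        constructor
        · simp only [List.singleton_append, List.filter_cons, List.isEmpty_nil, Bool.not_true,
            Bool.false_eq_true, if_false]
          exact IH.1
        · simp
      · -- no "  " at the front: the head piece of split("  ") extends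
        have IH := ih r.length (by simp) r rfl
        rw [pvS2_other hp]
        obtain ⟨h2, rest2, hs2⟩ : ∃ a as, pvS2 r [] = a :: as := by
          cases h : pvS2 r [] with
          | nil => exact absurd h (pvS2_ne_nil r [])
          | cons a as => exact ⟨a, as, rfl⟩
        rw [hs2] at IH ⊢
        simp only [List.modifyHead_cons, List.flatMap_cons] at IH ⊢
        by_cases hc : c = ' '
        · subst hc
          rw [pvS1_space, pvS1_space]
          constructor
          · simp only [List.cons_append, List.filter, List.isEmpty_nil, Bool.not_true]
            rw [IH.1]
          · simp
        · rw [pvS1_char hc, pvS1_char hc]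
          obtain ⟨ha, has, hsa⟩ : ∃ a as, pvS1 h2 [] = a :: as := by
            cases h : pvS1 h2 [] with
            | nil => exact absurd h (pvS1_ne_nil h2 [])
            | cons a as => exact ⟨a, as, rfl⟩
          obtain ⟨hb, hbs, hsb⟩ : ∃ b bs, pvS1 r [] = b :: bs := by
            cases h : pvS1 r [] with
            | nil => exact absurd h (pvS1_ne_nil r [])
            | cons b bs => exact ⟨b, bs, rfl⟩
          rw [hsa, hsb]
          rw [hsa, hsb] at IH
          have hab : ha = hb := by simpa using IH.2
          subst hab
          have htail : (has ++ rest2.flatMap (fun p => pvS1 p [])).filter (fun p => !p.isEmpty)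
              = hbs.filter (fun p => !p.isEmpty) := by
            have h1 := IH.1
            by_cases he : ha.isEmpty = true
            · simpa [List.cons_append, List.filter_cons, he] using h1
            · rw [List.cons_append, List.filter_cons, List.filter_cons] at h1
              simp only [he, Bool.not_false, if_true] at h1
              have := congrArg List.tail h1
              simpa using this
          constructor
          · simp only [List.modifyHead_cons, List.cons_append, List.filter_cons,
              List.isEmpty_cons, Bool.not_false, if_true]
            rw [htail]
          · simp
-- dropping empties from split(" ") is the single-pass space tokenizer
theorem pvS1_filter (t cur : List Char) :
    (pvS1 t cur).filter (fun p => !p.isEmpty) = pvToks (fun c => c == ' ') t cur.reverse := by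
  induction t generalizing cur with
  | nil =>
    simp only [pvS1, pvToks, List.filter]
    cases h : cur.reverse.isEmpty <;> simp_all
  | cons c rest ih =>
    by_cases hc : c = ' '
    · subst hc
      simp only [pvS1, pvToks, beq_self_eq_true, if_true, List.filter_cons]
      have := ih []
      cases h : cur.reverse.isEmpty <;> simp_all
    · simp only [pvS1, pvToks, if_neg hc]
      have hb : (c == ' ') = false := by simp [hc]
      simp only [hb, Bool.false_eq_true, if_false]
      have := ih (c :: cur)
      simpa using this

theorem pvG_space_iff (c : Char) : (pvG c == ' ') = pvD c := by
  unfold pvG pvD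
  by_cases h : c ∈ pvMarks <;> by_cases hs : c = ' ' <;> simp [h, hs]

theorem pvG_of_not_d (c : Char) (h : pvD c = false) : pvG c = c := by
  unfold pvD at h
  unfold pvG
  simp at h
  simp [h.2]

-- replacing marks by ' ' turns the space tokenizer into the delimiter tokenizer
theorem pvToks_map (u : List Char) (buf : List Char) :
    pvToks (fun c => c == ' ') (u.map pvG) buf = pvToks pvD u buf := by
  induction u generalizing buf with
  | nil => simp [pvToks]
  | cons c cs ih =>
    simp only [List.map_cons, pvToks, pvG_space_iff]
    cases h : pvD c with
    | true => simp [ih]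
    | false =>
      simp only [Bool.false_eq_true, if_false]
      rw [pvG_of_not_d c h, ih]

-- the marks are not letters, so lowercasing commutes with the mark replacement
theorem pvMarks_fixed : ∀ c ∈ pvMarks, PySem.Chars.lowerChar c = c := by
  intro c hc
  fin_cases hc <;> decide

theorem pvMarks_no_lower : ∀ c ∈ pvMarks, ¬(97 ≤ c.toNat ∧ c.toNat ≤ 122) := by
  intro c hc
  fin_cases hc <;> decide

theorem pvLowerChar_comm (c : Char) :
    PySem.Chars.lowerChar (pvG c) = pvG (PySem.Chars.lowerChar c) := by
  by_cases hm : c ∈ pvMarks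
  · have h1 := pvMarks_fixed c hm
    have hg : pvG c = ' ' := by simp [pvG, hm]
    rw [h1, hg]
    decide
  · by_cases hu : PySem.Chars.isupper c = true
    · have hAZ : 'A' ≤ c ∧ c ≤ 'Z' := by
        simpa [PySem.Chars.isupper] using hu
      have hval : c.toNat ≤ 90 := hAZ.2
      have hval2 : 65 ≤ c.toNat := hAZ.1
      have hvalid : (c.toNat + 32).isValidChar := by
        left; omega
      have hlow : (PySem.Chars.lowerChar c).toNat = c.toNat + 32 := by
        rw [PySem.Chars.lowerChar, if_pos hu, Char.ofNat, dif_pos hvalid]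
        rfl
      have hnm : PySem.Chars.lowerChar c ∉ pvMarks := by
        intro hmem
        exact pvMarks_no_lower _ hmem (by omega)
      simp [pvG, hm, hnm]
    · have hfix : PySem.Chars.lowerChar c = c := by
        rw [PySem.Chars.lowerChar, if_neg hu]
      simp [pvG, hm, hfix]

theorem pvLower_map (cs : List Char) :
    PySem.Chars.lower (cs.map pvG) = (PySem.Chars.lower cs).map pvG := by
  simp only [PySem.Chars.lower, List.map_map]
  exact List.map_congr_left (fun c _ => pvLowerChar_comm c)

-- A's remove-'' loop is a filter
theorem pvFilter_erase (l : List (List Char)) :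
    (l.erase []).filter (fun p => !p.isEmpty) = l.filter (fun p => !p.isEmpty) := by
  induction l with
  | nil => rfl
  | cons x xs ih =>
    by_cases hx : x = []
    · subst hx; simp [List.erase_cons]
    · rw [List.erase_cons]
      have : (x == ([] : List Char)) = false := by simp [hx]
      rw [this]
      simp only [Bool.false_eq_true, if_false, List.filter_cons, ih]

theorem pvRemoveAll_eq_filter (l : List (List Char)) :
    pvRemoveAll l = l.filter (fun p => !p.isEmpty) := by
  induction hn : l.length using Nat.strong_induction_on generalizing l with
  | _ n ih =>
    subst hn
    rw [pvRemoveAll]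
    split
    · next l' h =>
      have hv : ([] : List Char) ∈ l := by
        by_contra hv
        rw [(PySem.List.remove?_eq_none_iff l ([] : List Char)).2 hv] at h
        simp at h
      have hl : l' = l.erase [] := by
        rw [PySem.List.remove?_eq_some_erase l ([] : List Char) hv] at h
        exact (Option.some.injEq _ _).mp h.symm
      subst hl
      have hlt : (l.erase []).length < l.length := by
        have h1 := List.length_erase_of_mem hv
        have h2 := List.length_pos_of_mem hv
        omega
      rw [ih (l.erase []).length hlt _ rfl]
      exact pvFilter_erase l
    · next h =>
      have hv : ([] : List Char) ∉ l := (PySem.List.remove?_eq_none_iff l _).1 h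
      symm
      rw [List.filter_eq_self]
      intro a ha
      have : a ≠ [] := fun hae => hv (hae ▸ ha)
      simp [List.isEmpty_eq_false_iff.mpr this]

-- A's nested append loop flattens
theorem pvFlat (L : List (List (List Char))) (acc : List (List Char)) :
    L.foldl (fun a sub => sub.foldl (fun x it => x ++ [it]) a) acc = acc ++ L.flatten := by
  induction L generalizing acc with
  | nil => simp
  | cons sub L ih =>
    simp only [List.foldl_cons, ih, List.flatten_cons]
    rw [PySem.List.foldl_append_singleton]
    simp

-- B's fold computes the tokenizer
theorem pvB_fold (cs : List Char) (res : List String) (buf : List Char) :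
    (let st := cs.foldl (fun (st : List String × List Char) ch =>
        if ch = ' ' ∨ ch ∈ PySem.Set.ofList pvMarks then
          (if st.2.isEmpty then st else (st.1 ++ [String.ofList st.2], []))
        else (st.1, st.2 ++ [ch])) (res, buf)
     if st.2.isEmpty then st.1 else st.1 ++ [String.ofList st.2])
    = res ++ (pvToks pvD cs buf).map String.ofList := by
  induction cs generalizing res buf with
  | nil =>
    simp only [List.foldl_nil, pvToks]
    cases h : buf.isEmpty <;> simp [h]
  | cons c cs ih =>
    simp only [List.foldl_cons, pvToks]
    by_cases hd : (c = ' ' ∨ c ∈ PySem.Set.ofList pvMarks)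
    · have hD : pvD c = true := by
        unfold pvD
        rcases hd with hd | hd
        · simp [hd]
        · rw [PySem.Set.mem_ofList] at hd
          simp [hd]
      rw [if_pos hd, hD, if_pos rfl]
      cases hb : buf.isEmpty with
      | true =>
        have hbe : buf = [] := List.isEmpty_iff.1 hb
        subst hbe
        simp only [List.isEmpty_nil, if_pos rfl]
        exact ih res []
      | false =>
        simp only [hb, Bool.false_eq_true, if_false]
        rw [ih (res ++ [String.ofList buf]) []]
        simp
    · have hD : pvD c = false := by
        unfold pvD
        rw [PySem.Set.mem_ofList] at hd
        simp only [decide_eq_false_iff_not]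
        exact hd
      rw [if_neg hd, hD]
      simp only [Bool.false_eq_true, if_false]
      exact ih res (buf ++ [c])

-- assembled A-side characterization
theorem pvA_eq (searc : String) :
    standart searc
      = (pvToks pvD (PySem.Chars.lower (PySem.Chars.replace searc.toList ['\n'] [])) []).map
          String.ofList := by
  have step : standart searc
      = (pvRemoveAll
          (((PySem.Chars.splitOn
              (PySem.Chars.lower ((PySem.Chars.replace searc.toList ['\n'] []).map pvG))
              [' ', ' ']).map
             (fun p => PySem.Chars.splitOn p [' '])).foldl
            (fun acc sub => sub.foldl (fun a it => a ++ [it]) acc) [])).map String.ofList := rfl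
  rw [step, pvLower_map, splitOn_sp2,
    List.map_congr_left (fun p _ => splitOn_sp1 p),
    pvFlat, List.nil_append, ← List.flatMap_def, pvRemoveAll_eq_filter,
    (pvComp _).1, pvS1_filter]
  have hrev : ([] : List Char).reverse = [] := rfl
  rw [hrev, pvToks_map]

theorem pvB_eq (searc : String) :
    standart_alt searc
      = (pvToks pvD (PySem.Chars.lower (PySem.Chars.replace searc.toList ['\n'] [])) []).map
          String.ofList := by
  exact pvB_fold (PySem.Chars.lower (PySem.Chars.replace searc.toList ['\n'] [])) [] []

-- ===== VERDICT (by name: the statement is the Claim_ definition above) =====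
theorem standart_spec : Claim_equal_standart := by
  intro searc _
  unfold Spec_standart
  rw [pvA_eq, pvB_eq]
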